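-- pv_equiv track=rewrite | github.com/lucidfrontier45/PyNumPDB | pynumpdb/_selection.py | getModel
-- ===== SOURCE A (Python) =====
-- def stripHydrogen(pdb_data):
--   new_data = []
--   for line in pdb_data:
--     rec_name = line[0:6].strip()
--     if rec_name in ("ATOM","HETATM"):
--       atom_name = line[12:16].strip()
--       if (("H" not in atom_name) or (atom_name in ("NH1","NH2","OH","CH2"))):
--         new_data.append(line)
--     else :
--       new_data.append(line)
--   return new_data
--
-- def getLoc(pdb_data,loc="A"):
--   new_data = []
--   for line in pdb_data:
--     rec_name = line[0:6].strip()
--     if rec_name in ("ATOM","HETATM"):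
--       altLoc = line[16]
--       if altLoc in (" ",loc) :
--         new_line = line[:16] + " " + line[17:]
--         new_data.append(new_line)
--     else :
--       new_data.append(line)
--   return new_data
--
-- def getModel(pdb_data,model_num=1,noh=True,loc=None):
--   if noh:
--     data = stripHydrogen(pdb_data)
--   else:
--     data = pdb_data
--
--   if loc:
--     data = getLoc(data,loc)
--
--   new_data = []
--   model_count = 0
--   #first_chain = None
--
--   for line in data:
--
--     # choose first model
--     rec_name = line[0:6].strip()
--     if rec_name == "MODEL" :
--       model_count += 1
--     if model_count < model_num :
--       continue
--     elif model_count > model_num :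
--       break
--
--     if rec_name not in ("ATOM","HETATM"):
--       continue
--
--     #if first_chain == None:
--     #  first_chain = line[21]
--     #if line[21] != first_chain:
--     #  break
--
--     new_data.append(line)
--
--   if model_count == 0:
--     new_data = data
--
--   return new_data
-- ===== SOURCE B (Python) =====
-- def getModel(pdb_data, model_num=1, noh=True, loc=None):
--     # Single pass: per-line hydrogen/altLoc filtering fused with model selection.
--     processed = []
--     selected = []
--     model_count = 0
--     done = False
--     for line in pdb_data:
--         rec_name = line[0:6].strip()
--         is_atom = rec_name in ("ATOM", "HETATM")
--         if is_atom:
--             if noh: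
--                 atom_name = line[12:16].strip()
--                 if "H" in atom_name and atom_name not in ("NH1", "NH2", "OH", "CH2"):
--                     continue
--             if loc:
--                 if line[16] not in (" ", loc):
--                     continue
--                 line = line[:16] + " " + line[17:]
--         processed.append(line)
--         if done:
--             continue
--         if rec_name == "MODEL":
--             model_count += 1
--         if model_count < model_num:
--             continue
--         if model_count > model_num:
--             done = True
--             continue
--         if is_atom:
--             selected.append(line)
--     return processed if model_count == 0 else selected
-- ===== Notes on version B (the rewrite author's own statement) =====
-- stated objective: alternative
-- what changed: A runs three chained passes (stripHydrogen list, getLoc list, then the model-selection loop with break and a model_count==0 fallback); B is one fused loop over pdb_data that applies the hydrogen and altLoc filters per line while simultaneously tracking model_count, a done flag for the break, the full processed list (for the fallback) and the selected lines.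
import Mathlib
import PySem

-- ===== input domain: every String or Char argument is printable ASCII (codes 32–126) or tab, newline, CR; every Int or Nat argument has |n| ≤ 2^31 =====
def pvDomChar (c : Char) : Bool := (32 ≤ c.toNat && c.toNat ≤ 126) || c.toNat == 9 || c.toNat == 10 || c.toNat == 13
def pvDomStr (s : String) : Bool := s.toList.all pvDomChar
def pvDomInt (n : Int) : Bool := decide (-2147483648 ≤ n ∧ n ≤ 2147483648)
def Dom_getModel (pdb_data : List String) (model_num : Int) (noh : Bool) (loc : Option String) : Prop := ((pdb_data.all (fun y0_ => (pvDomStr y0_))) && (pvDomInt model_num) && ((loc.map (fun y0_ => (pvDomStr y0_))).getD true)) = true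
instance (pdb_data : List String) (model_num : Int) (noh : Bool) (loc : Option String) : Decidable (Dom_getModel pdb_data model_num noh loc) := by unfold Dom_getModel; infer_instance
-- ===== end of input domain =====

-- B fuses A's three passes (stripHydrogen, getLoc, model loop) into one loop over pdb_data;
-- objective: simpler/alternative single-pass decomposition, same return value.

-- ===== PORT A =====
-- shared per-line primitives (used by both ports; each is one Python expression)
-- line[0:6].strip()
def pvRecName (line : String) : String := PySem.Str.strip (PySem.Str.slice line (some 0) (some 6))
-- rec_name in ("ATOM","HETATM")
def pvIsAtom (line : String) : Bool := pvRecName line == "ATOM" || pvRecName line == "HETATM"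
-- the hydrogen DROP test: "H" in line[12:16].strip() and it is not NH1/NH2/OH/CH2
def pvHDrop (line : String) : Bool :=
  let atom_name := PySem.Str.strip (PySem.Str.slice line (some 12) (some 16))
  PySem.Str.isIn "H" atom_name &&
    !(atom_name == "NH1" || atom_name == "NH2" || atom_name == "OH" || atom_name == "CH2")
-- Python truthiness of the 'loc' argument (None and "" are falsy)
def pvLocTruthy (loc : Option String) : Bool := !(loc.getD "" == "")
-- altLoc in (" ", loc)
def pvAltKeep (loc : String) (c : Char) : Bool := c == ' ' || String.ofList [c] == loc
-- line[:16] + " " + line[17:]   (str concatenation = append of the code-point lists)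
def pvBlank16 (line : String) : String :=
  String.ofList ((PySem.Str.slice line none (some 16)).toList ++ ' ' :: (PySem.Str.slice line (some 17) none).toList)

-- stripHydrogen: first pass, accumulator = new_data
def pvStripH : List String → List String → List String
  | acc, [] => acc
  | acc, line :: rest =>
    if pvIsAtom line then
      if pvHDrop line then pvStripH acc rest else pvStripH (acc ++ [line]) rest
    else pvStripH (acc ++ [line]) rest

-- getLoc: second pass; none = IndexError from line[16] (excluded by Pre_getModel)
def pvGetLoc (loc : String) : List String → List String → Option (List String)
  | acc, [] => some acc
  | acc, line :: rest =>
    if pvIsAtom line then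
      match PySem.Str.pyGet? line 16 with
      | none => none
      | some altLoc =>
        if pvAltKeep loc altLoc then pvGetLoc loc (acc ++ [pvBlank16 line]) rest
        else pvGetLoc loc acc rest
    else pvGetLoc loc (acc ++ [line]) rest

-- the model-selection loop; early return = Python's break; returns (new_data, model_count)
def pvModelLoop (m : Int) : Int → List String → List String → List String × Int
  | c, acc, [] => (acc, c)
  | c, acc, line :: rest =>
    let rec_name := pvRecName line
    let c' := if rec_name == "MODEL" then c + 1 else c
    if c' < m then pvModelLoop m c' acc rest
    else if m < c' then (acc, c')
    else if !(rec_name == "ATOM" || rec_name == "HETATM") then pvModelLoop m c' acc rest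
    else pvModelLoop m c' (acc ++ [line]) rest

def getModel (pdb_data : List String) (model_num : Int) (noh : Bool) (loc : Option String) : List String :=
  let data := if noh then pvStripH [] pdb_data else pdb_data
  -- '.getD []' only covers getLoc's IndexError, which Pre_getModel excludes
  let data := if pvLocTruthy loc then (pvGetLoc (loc.getD "") [] data).getD [] else data
  let r := pvModelLoop model_num 0 [] data
  if r.2 == 0 then data else r.1

-- ===== PORT B =====
-- straight-line tail of B's loop body after the filters: append to processed, then the
-- model bookkeeping; state = (model_count, done, processed, selected)
def pvEmit (m : Int) (rec_name : String) (is_atom : Bool) (line : String)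
    (c : Int) (done : Bool) (processed selected : List String) :
    Int × Bool × List String × List String :=
  let processed := processed ++ [line]
  if done then (c, done, processed, selected)
  else
    let c := if rec_name == "MODEL" then c + 1 else c
    if c < m then (c, done, processed, selected)
    else if m < c then (c, true, processed, selected)
    else if is_atom then (c, done, processed, selected ++ [line])
    else (c, done, processed, selected)

-- B's single fused loop; the 'none' arm of pyGet? is B's own IndexError (excluded by Pre_getModel)
def pvLoopB (m : Int) (noh : Bool) (loc : Option String) :
    Int → Bool → List String → List String → List String → List String × List String × Int
  | c, _, processed, selected, [] => (processed, selected, c)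
  | c, done, processed, selected, line :: rest =>
    let rec_name := pvRecName line
    let is_atom := rec_name == "ATOM" || rec_name == "HETATM"
    if noh && is_atom && pvHDrop line then
      pvLoopB m noh loc c done processed selected rest
    else if pvLocTruthy loc && is_atom then
      match PySem.Str.pyGet? line 16 with
      | none => (processed, selected, c)
      | some altLoc =>
        if pvAltKeep (loc.getD "") altLoc then
          let s := pvEmit m rec_name is_atom (pvBlank16 line) c done processed selected
          pvLoopB m noh loc s.1 s.2.1 s.2.2.1 s.2.2.2 rest
        else pvLoopB m noh loc c done processed selected rest
    else
      let s := pvEmit m rec_name is_atom line c done processed selected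
      pvLoopB m noh loc s.1 s.2.1 s.2.2.1 s.2.2.2 rest

def getModel_alt (pdb_data : List String) (model_num : Int) (noh : Bool) (loc : Option String) : List String :=
  let r := pvLoopB model_num noh loc 0 false [] [] pdb_data
  if r.2.2 == 0 then r.1 else r.2.1

-- ===== PRECONDITION & SPEC =====
-- Pre_ excludes exactly the inputs where A raises IndexError: loc truthy and some
-- ATOM/HETATM line that survives the hydrogen filter is shorter than 17 characters.
def Pre_getModel (pdb_data : List String) (model_num : Int) (noh : Bool) (loc : Option String) : Prop :=
  pvLocTruthy loc = true → ∀ line ∈ pdb_data, pvIsAtom line = true →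
    (noh = true ∧ pvHDrop line = true) ∨ 17 ≤ line.toList.length
instance (pdb_data : List String) (model_num : Int) (noh : Bool) (loc : Option String) : Decidable (Pre_getModel pdb_data model_num noh loc) := by unfold Pre_getModel; infer_instance

def pvWitness_getModel : List String × Int × Bool × Option String :=
  (["MODEL     1", "ATOM  xxxxxxCA  A tail", "ATOM  xxxxxxHB2 A tail", "ENDMDL"], 1, true, some "A")

def Spec_getModel (pdb_data : List String) (model_num : Int) (noh : Bool) (loc : Option String) (out : List String) : Prop := out = getModel_alt pdb_data model_num noh loc
instance (pdb_data : List String) (model_num : Int) (noh : Bool) (loc : Option String) (out : List String) : Decidable (Spec_getModel pdb_data model_num noh loc out) := by unfold Spec_getModel; infer_instance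

-- ===== CLAIM (what is proved, stated in full; the proofs are below) =====
def Claim_equal_getModel : Prop := ∀ (pdb_data : List String) (model_num : Int) (noh : Bool) (loc : Option String), Dom_getModel pdb_data model_num noh loc → Pre_getModel pdb_data model_num noh loc → Spec_getModel pdb_data model_num noh loc (getModel pdb_data model_num noh loc)

-- ===== LEMMAS AND PROOFS =====

-- the per-line effect both pipelines realise: none = line dropped, some l' = l' kept
def pvStep (noh : Bool) (loc : Option String) (line : String) : Option String :=
  if noh && pvIsAtom line && pvHDrop line then none
  else if pvLocTruthy loc && pvIsAtom line then
    match PySem.Str.pyGet? line 16 with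
    | none => none   -- unreachable under the no-raise hypothesis
    | some altLoc => if pvAltKeep (loc.getD "") altLoc then some (pvBlank16 line) else none
  else some line

def pvLocStep (s : String) (line : String) : Option String :=
  if pvIsAtom line then
    match PySem.Str.pyGet? line 16 with
    | none => none
    | some altLoc => if pvAltKeep s altLoc then some (pvBlank16 line) else none
  else some line

lemma pvGet16 (line : String) : PySem.Str.pyGet? line 16 = line.toList[16]? := by
  simp [pysem]

lemma pvGet16' (cs : List Char) : PySem.List.pyGet? cs 16 = cs[16]? := by
  simp [pysem]

lemma pvEmit_done (m : Int) (r : String) (ia : Bool) (line : String) (c : Int)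
    (proc sel : List String) :
    pvEmit m r ia line c true proc sel = (c, true, proc ++ [line], sel) := rfl

lemma pvEmit_live (m : Int) (r : String) (ia : Bool) (line : String) (c : Int)
    (proc sel : List String) :
    pvEmit m r ia line c false proc sel =
      (if (if r == "MODEL" then c + 1 else c) < m then
        ((if r == "MODEL" then c + 1 else c), false, proc ++ [line], sel)
      else if m < (if r == "MODEL" then c + 1 else c) then
        ((if r == "MODEL" then c + 1 else c), true, proc ++ [line], sel)
      else if ia then
        ((if r == "MODEL" then c + 1 else c), false, proc ++ [line], sel ++ [line])
      else ((if r == "MODEL" then c + 1 else c), false, proc ++ [line], sel)) := rfl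

lemma pvStripH_eq (l acc : List String) :
    pvStripH acc l = acc ++ l.filter (fun line => !(pvIsAtom line && pvHDrop line)) := by
  induction l generalizing acc with
  | nil => simp [pvStripH]
  | cons line rest ih =>
    by_cases hA : pvIsAtom line = true <;> by_cases hH : pvHDrop line = true <;>
      simp [pvStripH, hA, hH, ih]

lemma pvGetLoc_eq (s : String) (l : List String)
    (h : ∀ line ∈ l, pvIsAtom line = true → 17 ≤ line.toList.length) (acc : List String) :
    pvGetLoc s acc l = some (acc ++ l.filterMap (pvLocStep s)) := by
  induction l generalizing acc with
  | nil => simp [pvGetLoc]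
  | cons line rest ih =>
    have hrest : ∀ line ∈ rest, pvIsAtom line = true → 17 ≤ line.toList.length := by
      intro x hx; exact h x (List.mem_cons_of_mem _ hx)
    by_cases hA : pvIsAtom line = true
    · have hlen : 17 ≤ line.toList.length := h line (List.mem_cons_self) hA
      obtain ⟨a, ha⟩ : ∃ a, line.toList[16]? = some a :=
        ⟨_, List.getElem?_eq_getElem (by omega)⟩
      by_cases hK : pvAltKeep s a = true <;>
        simp [pvGetLoc, pvLocStep, hA, pvGet16, pvGet16', ha, hK, ih hrest]
    · simp [pvGetLoc, pvLocStep, hA, ih hrest]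

-- the processed data A builds equals one filterMap of pvStep
lemma pvPipeline_eq (pdb_data : List String) (noh : Bool) (loc : Option String)
    (hpre : pvLocTruthy loc = true → ∀ line ∈ pdb_data, pvIsAtom line = true →
      (noh = true ∧ pvHDrop line = true) ∨ 17 ≤ line.toList.length) :
    (if pvLocTruthy loc then
        (pvGetLoc (loc.getD "") [] (if noh then pvStripH [] pdb_data else pdb_data)).getD []
      else if noh then pvStripH [] pdb_data else pdb_data)
      = pdb_data.filterMap (pvStep noh loc) := by
  by_cases hloc : pvLocTruthy loc = true
  · rw [if_pos hloc]
    have hdata : (if noh then pvStripH [] pdb_data else pdb_data)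
        = pdb_data.filter (fun line => !(noh && pvIsAtom line && pvHDrop line)) := by
      cases noh with
      | false => simp
      | true => rw [if_pos rfl, pvStripH_eq]; simp
    have hlen : ∀ line ∈ pdb_data.filter (fun line => !(noh && pvIsAtom line && pvHDrop line)),
        pvIsAtom line = true → 17 ≤ line.toList.length := by
      intro line hmem hA
      rw [List.mem_filter] at hmem
      rcases hpre hloc line hmem.1 hA with h | h
      · exfalso; have := hmem.2; rw [h.1] at this; simp [hA, h.2] at this
      · exact h
    rw [hdata, pvGetLoc_eq _ _ hlen, Option.getD_some, List.nil_append,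
      List.filterMap_filter]
    apply List.filterMap_congr
    intro line _
    by_cases hA : pvIsAtom line = true <;> cases noh <;> by_cases hH : pvHDrop line = true <;>
      simp_all [pvStep, pvLocStep, hloc]
  · rw [if_neg hloc]
    have hloc' : pvLocTruthy loc = false := by simpa using hloc
    have hstep : ∀ line ∈ pdb_data, pvStep noh loc line
        = if noh && pvIsAtom line && pvHDrop line then none else some line := by
      intro line _
      simp [pvStep, hloc']
    rw [List.filterMap_congr hstep]
    cases noh with
    | false => simp
    | true =>
      rw [if_pos rfl, pvStripH_eq, List.nil_append]
      rw [← List.filterMap_eq_filter]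
      apply List.filterMap_congr
      intro line _
      by_cases h : (pvIsAtom line && pvHDrop line) = true <;> simp [h, Option.guard]

-- pvBlank16 keeps the record name (columns 0-5) intact
lemma pvRecName_blank16 (line : String) (h : 17 ≤ line.toList.length) :
    pvRecName (pvBlank16 line) = pvRecName line := by
  apply String.toList_inj.mp
  unfold pvRecName
  rw [PySem.Str.toList_strip, PySem.Str.toList_strip]
  have h0 : ((0 : Int)) = ((0 : Nat) : Int) := rfl
  have h6 : ((6 : Int)) = ((6 : Nat) : Int) := by norm_num
  have h16 : ((16 : Int)) = ((16 : Nat) : Int) := by norm_num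
  have harg : (PySem.Str.slice (pvBlank16 line) (some 0) (some 6)).toList
      = (PySem.Str.slice line (some 0) (some 6)).toList := by
    rw [PySem.Str.toList_slice, PySem.Str.toList_slice]
    simp only [PySem.Chars.slice_eq_listSlice]
    rw [h0, h6, PySem.List.slice_natCast, PySem.List.slice_natCast]
    unfold pvBlank16
    simp only [String.toList_ofList, PySem.Str.toList_slice, PySem.Chars.slice_eq_listSlice]
    rw [h16, PySem.List.slice_to_natCast, List.drop_zero, List.drop_zero,
      List.take_append, List.take_take]
    have hl : (List.take 16 line.toList).length = 16 := by simp only [List.length_take]; omega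
    rw [hl]
    norm_num
  rw [harg]

-- once done is set B only finishes building processed
lemma pvLoopB_done (m : Int) (noh : Bool) (loc : Option String) (l : List String)
    (h : ∀ line ∈ l, pvLocTruthy loc = true → pvIsAtom line = true →
      (noh = true ∧ pvHDrop line = true) ∨ 17 ≤ line.toList.length)
    (c : Int) (sel : List String) :
    ∀ proc : List String,
      pvLoopB m noh loc c true proc sel l = (proc ++ l.filterMap (pvStep noh loc), sel, c) := by
  induction l with
  | nil => simp [pvLoopB]
  | cons line rest ih =>
    intro proc
    have hrest : ∀ x ∈ rest, pvLocTruthy loc = true → pvIsAtom x = true →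
        (noh = true ∧ pvHDrop x = true) ∨ 17 ≤ x.toList.length := by
      intro x hx; exact h x (List.mem_cons_of_mem _ hx)
    by_cases hdrop : (noh && pvIsAtom line && pvHDrop line) = true
    · have hstep : pvStep noh loc line = none := by simp [pvStep, hdrop]
      simp only [pvLoopB]
      rw [if_pos (by simpa [pvIsAtom] using hdrop)]
      rw [ih hrest]
      simp [hstep]
    · by_cases hla : (pvLocTruthy loc && pvIsAtom line) = true
      · obtain ⟨hl1, hl2⟩ : pvLocTruthy loc = true ∧ pvIsAtom line = true := by
          simpa [Bool.and_eq_true] using hla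
        have hlen : 17 ≤ line.toList.length := by
          rcases h line List.mem_cons_self hl1 hl2 with hh | hh
          · exact absurd (by simp [hh.1, hh.2, hl2]) hdrop
          · exact hh
        obtain ⟨a, ha⟩ : ∃ a, line.toList[16]? = some a :=
          ⟨_, List.getElem?_eq_getElem (by omega)⟩
        have hstep : pvStep noh loc line
            = if pvAltKeep (loc.getD "") a then some (pvBlank16 line) else none := by
          simp [pvStep, hdrop, hla, pvGet16, pvGet16', ha]
        by_cases hK : pvAltKeep (loc.getD "") a = true <;>
          · simp only [pvLoopB]
            rw [if_neg (by simpa [pvIsAtom] using hdrop), if_pos (by simpa [pvIsAtom] using hla),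
              pvGet16, ha]
            simp [hK, pvEmit_done, ih hrest, hstep]
      · have hstep : pvStep noh loc line = some line := by
          simp only [pvStep]
          rw [if_neg hdrop, if_neg hla]
        simp only [pvLoopB]
        rw [if_neg (by simpa [pvIsAtom] using hdrop), if_neg (by simpa [pvIsAtom] using hla)]
        simp [pvEmit_done, ih hrest, hstep]

-- B's live loop = A's model loop run over the filterMap, with processed alongside
lemma pvLoopB_live (m : Int) (noh : Bool) (loc : Option String) (l : List String)
    (h : ∀ line ∈ l, pvLocTruthy loc = true → pvIsAtom line = true →
      (noh = true ∧ pvHDrop line = true) ∨ 17 ≤ line.toList.length)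
    (c : Int) (proc sel : List String) :
    pvLoopB m noh loc c false proc sel l
      = (proc ++ l.filterMap (pvStep noh loc),
         (pvModelLoop m c sel (l.filterMap (pvStep noh loc))).1,
         (pvModelLoop m c sel (l.filterMap (pvStep noh loc))).2) := by
  induction l generalizing c proc sel with
  | nil => simp [pvLoopB, pvModelLoop]
  | cons line rest ih =>
    have hrest : ∀ x ∈ rest, pvLocTruthy loc = true → pvIsAtom x = true →
        (noh = true ∧ pvHDrop x = true) ∨ 17 ≤ x.toList.length := by
      intro x hx; exact h x (List.mem_cons_of_mem _ hx)
    by_cases hdrop : (noh && pvIsAtom line && pvHDrop line) = true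
    · have hstep : pvStep noh loc line = none := by simp [pvStep, hdrop]
      simp only [pvLoopB]
      rw [if_pos (by simpa [pvIsAtom] using hdrop)]
      rw [ih hrest]
      simp [hstep]
    · -- the line survives the filters as line' with the same record name
      have main : ∀ line' : String, pvRecName line' = pvRecName line →
          pvStep noh loc line = some line' →
          (let s := pvEmit m (pvRecName line)
              (pvRecName line == "ATOM" || pvRecName line == "HETATM") line' c false proc sel
           pvLoopB m noh loc s.1 s.2.1 s.2.2.1 s.2.2.2 rest)
            = (proc ++ (line :: rest).filterMap (pvStep noh loc),
               (pvModelLoop m c sel ((line :: rest).filterMap (pvStep noh loc))).1,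
               (pvModelLoop m c sel ((line :: rest).filterMap (pvStep noh loc))).2) := by
        intro line' hrec hstep
        have hfm : (line :: rest).filterMap (pvStep noh loc)
            = line' :: rest.filterMap (pvStep noh loc) := by simp [hstep]
        rw [hfm]
        simp only [pvEmit_live, pvModelLoop, hrec]
        split_ifs <;>
          simp_all [ih hrest, pvLoopB_done m noh loc rest hrest]
      by_cases hla : (pvLocTruthy loc && pvIsAtom line) = true
      · obtain ⟨hl1, hl2⟩ : pvLocTruthy loc = true ∧ pvIsAtom line = true := by
          simpa [Bool.and_eq_true] using hla
        have hlen : 17 ≤ line.toList.length := by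
          rcases h line List.mem_cons_self hl1 hl2 with hh | hh
          · exact absurd (by simp [hh.1, hh.2, hl2]) hdrop
          · exact hh
        obtain ⟨a, ha⟩ : ∃ a, line.toList[16]? = some a :=
          ⟨_, List.getElem?_eq_getElem (by omega)⟩
        by_cases hK : pvAltKeep (loc.getD "") a = true
        · have hstep : pvStep noh loc line = some (pvBlank16 line) := by
            simp [pvStep, hdrop, hla, pvGet16, pvGet16', ha, hK]
          have hb : pvLoopB m noh loc c false proc sel (line :: rest)
              = (let s := pvEmit m (pvRecName line)
                    (pvRecName line == "ATOM" || pvRecName line == "HETATM")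
                    (pvBlank16 line) c false proc sel
                 pvLoopB m noh loc s.1 s.2.1 s.2.2.1 s.2.2.2 rest) := by
            simp only [pvLoopB]
            rw [if_neg (by simpa [pvIsAtom] using hdrop), if_pos (by simpa [pvIsAtom] using hla),
              pvGet16, ha]
            simp [hK]
          rw [hb]
          exact main (pvBlank16 line) (pvRecName_blank16 line hlen) hstep
        · have hstep : pvStep noh loc line = none := by
            simp [pvStep, hdrop, hla, pvGet16, pvGet16', ha, hK]
          simp only [pvLoopB]
          rw [if_neg (by simpa [pvIsAtom] using hdrop), if_pos (by simpa [pvIsAtom] using hla),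
            pvGet16, ha]
          simp [hK, ih hrest, hstep]
      · have hstep : pvStep noh loc line = some line := by
          simp only [pvStep]
          rw [if_neg hdrop, if_neg hla]
        have hb : pvLoopB m noh loc c false proc sel (line :: rest)
            = (let s := pvEmit m (pvRecName line)
                  (pvRecName line == "ATOM" || pvRecName line == "HETATM")
                  line c false proc sel
               pvLoopB m noh loc s.1 s.2.1 s.2.2.1 s.2.2.2 rest) := by
          simp only [pvLoopB]
          rw [if_neg (by simpa [pvIsAtom] using hdrop), if_neg (by simpa [pvIsAtom] using hla)]
        rw [hb]
        exact main line rfl hstep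

-- ===== VERDICT (by name: the statement is the Claim_ definition above) =====
theorem getModel_spec : Claim_equal_getModel := by
  intro pdb_data model_num noh loc _ hpre
  unfold Spec_getModel getModel getModel_alt
  rw [pvLoopB_live model_num noh loc pdb_data
    (fun line hmem hloc hA => hpre hloc line hmem hA) 0 [] []]
  have hdata := pvPipeline_eq pdb_data noh loc hpre
  simp only [List.nil_append]
  rw [hdata]
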